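-- pv_equiv track=rewrite | github.com/iree-org/iree | build_tools/scripts/unicode_tables_gen.py | build_category_ranges
-- ===== SOURCE A (Python) =====
-- def build_category_ranges(categories: dict, legacy_mn_codepoints: set) -> list:
--     """Build compact category ranges from individual codepoint categories.
--
--     Returns a list of (start, end, flags_string) tuples, where flags_string
--     is the C expression for the category flags (e.g., "M|MN" for Mn).
--
--     The Mn (Mark, Nonspacing) subcategory is tracked separately so that
--     accent stripping can distinguish Mn from Mc (Spacing Combining) and
--     Me (Enclosing). This is required for HuggingFace compatibility.
--
--     Only codepoints that were Mn in the legacy Unicode version (8.0) get the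
--     MN flag. Characters that became Mn in later Unicode versions should NOT
--     be stripped during accent stripping to match HuggingFace behavior.
--     """
--     # Group by (major_category, is_legacy_mn) tuple.
--     # is_legacy_mn is True only if the codepoint was Mn in Unicode 8.0.
--     by_key = {}
--     for cp, cat in sorted(categories.items()):
--         major = cat[0] if cat else "C"
--         # Only set MN flag for codepoints that were Mn in the legacy version.
--         is_legacy_mn = cp in legacy_mn_codepoints
--         key = (major, is_legacy_mn)
--         if key not in by_key:
--             by_key[key] = []
--         by_key[key].append(cp)
--
--     # Build ranges.
--     ranges = []
--     for (major, is_legacy_mn), codepoints in by_key.items():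
--         codepoints = sorted(set(codepoints))
--         if not codepoints:
--             continue
--
--         # Determine the flags string for this category.
--         if is_legacy_mn:
--             flags = f"{major}|MN"  # e.g., "M|MN"
--         else:
--             flags = major  # e.g., "M", "L", etc.
--
--         # Merge consecutive codepoints into ranges.
--         start = codepoints[0]
--         end = start
--         for cp in codepoints[1:]:
--             if cp == end + 1:
--                 end = cp
--             else:
--                 ranges.append((start, end, flags))
--                 start = cp
--                 end = cp
--         ranges.append((start, end, flags))
--
--     # Sort by start codepoint.
--     ranges.sort(key=lambda r: r[0])
--
--     # Filter to only include non-ASCII ranges (ASCII is handled inline).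
--     ranges = [(s, e, c) for s, e, c in ranges if s >= 0x80]
--
--     return ranges
-- ===== SOURCE B (Python) =====
-- def build_category_ranges(categories: dict, legacy_mn_codepoints: set) -> list:
--     """Single sorted sweep: one open run, broken on a numeric gap or a flags change."""
--     ranges = []
--     start = end = None
--     flags = None
--     for cp, cat in sorted(categories.items()):
--         major = cat[0] if cat else "C"
--         f = major + "|MN" if cp in legacy_mn_codepoints else major
--         if start is not None and cp == end + 1 and f == flags:
--             end = cp
--         else:
--             if start is not None:
--                 ranges.append((start, end, flags))
--             start = end = cp
--             flags = f
--     if start is not None: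
--         ranges.append((start, end, flags))
--     return [(s, e, c) for s, e, c in ranges if s >= 0x80]
-- ===== Notes on version B (the rewrite author's own statement) =====
-- stated objective: simpler
-- what changed: B replaces A's group-by-(major,legacy_mn) dict, per-group duplicate-elimination and run merging, and final sort of the collected ranges by a single sweep over the sorted codepoints that keeps one open range and closes it on a numeric gap or a flags change, so the result is built already sorted.
import Mathlib
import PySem

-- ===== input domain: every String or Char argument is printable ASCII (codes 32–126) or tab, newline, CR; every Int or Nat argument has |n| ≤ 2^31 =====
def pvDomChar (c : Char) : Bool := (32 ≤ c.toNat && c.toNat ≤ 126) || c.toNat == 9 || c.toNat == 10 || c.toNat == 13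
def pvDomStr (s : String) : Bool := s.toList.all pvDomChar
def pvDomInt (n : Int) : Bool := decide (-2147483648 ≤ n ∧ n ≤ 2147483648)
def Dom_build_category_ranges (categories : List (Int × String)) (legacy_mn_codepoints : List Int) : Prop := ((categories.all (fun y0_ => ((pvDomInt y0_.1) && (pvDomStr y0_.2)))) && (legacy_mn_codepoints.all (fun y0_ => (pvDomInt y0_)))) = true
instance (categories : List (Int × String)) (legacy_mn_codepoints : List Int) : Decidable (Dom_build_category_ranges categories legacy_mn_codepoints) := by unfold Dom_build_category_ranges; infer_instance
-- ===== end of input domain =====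

-- B replaces A's group-by-key dict + per-group run merging + final sort by a single sweep
-- over the sorted codepoints that keeps one open run (objective: simpler, same O(n log n)).

-- ===== PORT A =====
-- `cat[0] if cat else "C"`: exact — cat[0] on a nonempty string is its first character as a string.
def pvMajor (cat : String) : String :=
  match cat.toList with
  | [] => "C"
  | c :: _ => String.ofList [c]

def build_category_ranges (categories : List (Int × String)) (legacy_mn_codepoints : List Int) : List (Int × Int × String) :=
  -- sorted(categories.items()): keys of a dict are distinct, so the tuple sort is the
  -- stable sort by the integer key — exact.
  let items := PySem.List.sorted (PySem.Dict.ofList categories).items (fun p => p.1) false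
  let by_key : PySem.Dict (String × Bool) (List Int) :=
    items.foldl (fun d p =>
      let key := (pvMajor p.2, (PySem.Set.ofList legacy_mn_codepoints).contains p.1)
      let d := if d.contains key then d else d.insert key []
      d.insert key (d.getD key [] ++ [p.1])) PySem.Dict.empty
  let ranges : List (Int × Int × String) :=
    by_key.items.foldl (fun acc kv =>
      let cps := PySem.List.sorted (PySem.Set.ofList kv.2) (fun x => x) false
      match cps with
      | [] => acc  -- `if not codepoints: continue`
      | c0 :: rest =>
        let flags := if kv.1.2 then kv.1.1 ++ "|MN" else kv.1.1
        let st := rest.foldl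
          (fun (st : List (Int × Int × String) × Int × Int) cp =>
            if cp = st.2.2 + 1 then (st.1, st.2.1, cp)
            else (st.1 ++ [(st.2.1, st.2.2, flags)], cp, cp))
          (acc, c0, c0)
        st.1 ++ [(st.2.1, st.2.2, flags)]) []
  let ranges := PySem.List.sorted ranges (fun r => r.1) false
  -- the comprehension rebuilds the same tuple, so it is a filter
  ranges.filter (fun r => decide (128 ≤ r.1))

-- ===== PORT B =====
def build_category_ranges_alt (categories : List (Int × String)) (legacy_mn_codepoints : List Int) : List (Int × Int × String) :=
  let items := PySem.List.sorted (PySem.Dict.ofList categories).items (fun p => p.1) false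
  let st := items.foldl
    (fun (st : List (Int × Int × String) × Option (Int × Int × String)) p =>
      let major := pvMajor p.2
      let f := if (PySem.Set.ofList legacy_mn_codepoints).contains p.1 then major ++ "|MN" else major
      match st.2 with
      | some (s, e, fl) =>
        if p.1 = e + 1 ∧ f = fl then (st.1, some (s, p.1, fl))
        else (st.1 ++ [(s, e, fl)], some (p.1, p.1, f))
      | none => (st.1, some (p.1, p.1, f)))
    ([], none)
  let ranges := match st.2 with
    | some r => st.1 ++ [r]
    | none => st.1
  ranges.filter (fun r => decide (128 ≤ r.1))

-- ===== PRECONDITION & SPEC =====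
def Spec_build_category_ranges (categories : List (Int × String)) (legacy_mn_codepoints : List Int) (out : List (Int × Int × String)) : Prop := out = build_category_ranges_alt categories legacy_mn_codepoints
instance (categories : List (Int × String)) (legacy_mn_codepoints : List Int) (out : List (Int × Int × String)) : Decidable (Spec_build_category_ranges categories legacy_mn_codepoints out) := by unfold Spec_build_category_ranges; infer_instance

-- ===== CLAIM (what is proved, stated in full; the proofs are below) =====
def Claim_equal_build_category_ranges : Prop := ∀ (categories : List (Int × String)) (legacy_mn_codepoints : List Int), Dom_build_category_ranges categories legacy_mn_codepoints → Spec_build_category_ranges categories legacy_mn_codepoints (build_category_ranges categories legacy_mn_codepoints)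

-- ===== LEMMAS AND PROOFS =====

-- The key under which A groups a sorted item, and the flags string it renders to.
def pvKey (legacy : List Int) (p : Int × String) : String × Bool :=
  (pvMajor p.2, (PySem.Set.ofList legacy).contains p.1)

def pvRender (k : String × Bool) : String := if k.2 then k.1 ++ "|MN" else k.1

def pvF (legacy : List Int) (p : Int × String) : String := pvRender (pvKey legacy p)

-- A's inner merge loop, as a recursion on the codepoint list.
def pvMgo (f : String) (s e : Int) : List Int → List (Int × Int × String)
  | [] => [(s, e, f)]
  | cp :: rest => if cp = e + 1 then pvMgo f s cp rest else (s, e, f) :: pvMgo f cp cp rest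

def pvMerge (f : String) : List Int → List (Int × Int × String)
  | [] => []
  | c0 :: rest => pvMgo f c0 c0 rest

-- B's sweep, as a recursion on the sorted item list.
def pvRgo (legacy : List Int) (s e : Int) (f : String) : List (Int × String) → List (Int × Int × String)
  | [] => [(s, e, f)]
  | x :: rest =>
    if x.1 = e + 1 ∧ pvF legacy x = f then pvRgo legacy s x.1 f rest
    else (s, e, f) :: pvRgo legacy x.1 x.1 (pvF legacy x) rest

def pvRuns (legacy : List Int) : List (Int × String) → List (Int × Int × String)
  | [] => []
  | x :: rest => pvRgo legacy x.1 x.1 (pvF legacy x) rest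

-- A's codepoint group for a key, over the sorted item list.
def pvGroup (legacy : List Int) (xs : List (Int × String)) (k : String × Bool) : List Int :=
  (xs.filter (fun x => pvKey legacy x == k)).map (fun x => x.1)

-- ---------- B's fold is pvRuns ----------

theorem pvF_eq (legacy : List Int) (p : Int × String) :
    (if (PySem.Set.ofList legacy).contains p.1 = true then pvMajor p.2 ++ "|MN" else pvMajor p.2)
      = pvF legacy p := rfl

theorem pvAlt_fold_some (legacy : List Int) (l : List (Int × String)) :
    ∀ (acc : List (Int × Int × String)) (s e : Int) (f : String),
    (let st := l.foldl
      (fun (st : List (Int × Int × String) × Option (Int × Int × String)) p =>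
        let major := pvMajor p.2
        let fl' := if (PySem.Set.ofList legacy).contains p.1 then major ++ "|MN" else major
        match st.2 with
        | some (s, e, fl) =>
          if p.1 = e + 1 ∧ fl' = fl then (st.1, some (s, p.1, fl))
          else (st.1 ++ [(s, e, fl)], some (p.1, p.1, fl'))
        | none => (st.1, some (p.1, p.1, fl')))
      (acc, some (s, e, f));
     match st.2 with | some r => st.1 ++ [r] | none => st.1)
    = acc ++ pvRgo legacy s e f l := by
  induction l with
  | nil => intro acc s e f; simp [pvRgo]
  | cons x t ih =>
    intro acc s e f
    simp only [List.foldl_cons, pvF_eq, pvRgo]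
    by_cases hc : x.1 = e + 1 ∧ pvF legacy x = f
    · obtain ⟨h1, h2⟩ := hc
      simp only [h1, h2, and_self, ite_true]
      have := ih acc s (e + 1) f
      simp only [pvF_eq] at this
      exact this
    · simp only [if_neg hc]
      have := ih (acc ++ [(s, e, f)]) x.1 x.1 (pvF legacy x)
      simp only [pvF_eq] at this
      rw [this, List.append_assoc]
      rfl

theorem pvAlt_eq_runs (legacy : List Int) (xs : List (Int × String)) :
    (let st := xs.foldl
      (fun (st : List (Int × Int × String) × Option (Int × Int × String)) p =>
        let major := pvMajor p.2
        let fl' := if (PySem.Set.ofList legacy).contains p.1 then major ++ "|MN" else major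
        match st.2 with
        | some (s, e, fl) =>
          if p.1 = e + 1 ∧ fl' = fl then (st.1, some (s, p.1, fl))
          else (st.1 ++ [(s, e, fl)], some (p.1, p.1, fl'))
        | none => (st.1, some (p.1, p.1, fl')))
      ([], none);
     match st.2 with | some r => st.1 ++ [r] | none => st.1)
    = pvRuns legacy xs := by
  cases xs with
  | nil => rfl
  | cons x t =>
    simp only [List.foldl_cons, pvRuns]
    have := pvAlt_fold_some legacy t [] x.1 x.1 (pvF legacy x)
    simp only [List.nil_append] at this
    exact this

-- ---------- A's dict characterisation ----------

def pvStepD (legacy : List Int) (d : PySem.Dict (String × Bool) (List Int)) (p : Int × String) :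
    PySem.Dict (String × Bool) (List Int) :=
  let key := (pvMajor p.2, (PySem.Set.ofList legacy).contains p.1)
  let d := if d.contains key then d else d.insert key []
  d.insert key (d.getD key [] ++ [p.1])

theorem pvStepD_getD (legacy : List Int) (d : PySem.Dict (String × Bool) (List Int))
    (p : Int × String) (k : String × Bool) :
    (pvStepD legacy d p).getD k [] =
      if k = pvKey legacy p then d.getD (pvKey legacy p) [] ++ [p.1] else d.getD k [] := by
  show ((if d.contains (pvKey legacy p) then d else d.insert (pvKey legacy p) []).insert (pvKey legacy p)
      ((if d.contains (pvKey legacy p) then d else d.insert (pvKey legacy p) []).getD (pvKey legacy p) [] ++ [p.1])).getD k []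
    = _
  have hmid : (if d.contains (pvKey legacy p) then d else d.insert (pvKey legacy p) []).getD (pvKey legacy p) []
      = d.getD (pvKey legacy p) [] := by
    by_cases hc : d.contains (pvKey legacy p)
    · simp [hc]
    · simp only [hc, Bool.false_eq_true, if_false]
      rw [PySem.Dict.getD_insert_self, PySem.Dict.getD_of_not_contains d _ (by simpa using hc)]
  rw [hmid, PySem.Dict.getD_insert]
  by_cases hk : k = pvKey legacy p
  · simp [hk]
  · simp only [if_neg hk]
    by_cases hc : d.contains (pvKey legacy p)
    · simp [hc]
    · simp only [hc, Bool.false_eq_true, if_false]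
      rw [PySem.Dict.getD_insert_of_ne _ _ _ hk]

theorem pvStepD_keys (legacy : List Int) (d : PySem.Dict (String × Bool) (List Int))
    (p : Int × String) :
    (pvStepD legacy d p).keys = PySem.Set.add d.keys (pvKey legacy p) := by
  show ((if d.contains (pvKey legacy p) then d else d.insert (pvKey legacy p) []).insert (pvKey legacy p) _).keys = _
  by_cases hc : d.contains (pvKey legacy p)
  · simp only [hc, if_true]
    rw [PySem.Dict.keys_insert_of_contains _ _ hc,
      PySem.Set.add_of_mem (by rwa [← PySem.Dict.contains_iff_mem_keys])]
  · simp only [hc, Bool.false_eq_true, if_false]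
    rw [PySem.Dict.keys_insert_of_contains _ _ (PySem.Dict.contains_insert_self _ _ _),
      PySem.Dict.keys_insert_of_not_contains _ _ (by simpa using hc),
      PySem.Set.add_of_not_mem (by rw [← PySem.Dict.contains_iff_mem_keys]; simp [hc])]

theorem pvDict_keys (legacy : List Int) (xs : List (Int × String)) :
    (xs.foldl (pvStepD legacy) PySem.Dict.empty).keys
      = PySem.Set.ofList (xs.map (pvKey legacy)) := by
  induction xs using List.reverseRecOn with
  | nil => rfl
  | append_singleton xs x ih =>
    rw [List.foldl_append, List.foldl_cons, List.foldl_nil, pvStepD_keys, ih, List.map_append,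
      List.map_cons, List.map_nil, PySem.Set.ofList_append_singleton]

theorem pvDict_getD (legacy : List Int) (xs : List (Int × String)) (k : String × Bool) :
    (xs.foldl (pvStepD legacy) PySem.Dict.empty).getD k [] = pvGroup legacy xs k := by
  induction xs using List.reverseRecOn generalizing k with
  | nil => cases k; rfl
  | append_singleton xs x ih =>
    rw [List.foldl_append, List.foldl_cons, List.foldl_nil, pvStepD_getD]
    unfold pvGroup
    rw [List.filter_append]
    by_cases hk : k = pvKey legacy x
    · subst hk
      simp only [List.filter_cons, List.filter_nil, beq_self_eq_true, if_true, List.map_append]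
      rw [ih]
      rfl
    · simp only [if_neg hk, List.filter_cons, List.filter_nil]
      have : (pvKey legacy x == k) = false := by simpa [beq_iff_eq] using fun h => hk h.symm
      rw [this]
      simp only [Bool.false_eq_true, if_false, List.append_nil]
      exact ih k

theorem pvItems_eq_keys_map {κ ν : Type} [BEq κ] [LawfulBEq κ] (d : PySem.Dict κ ν) (dflt : ν)
    (h : d.keys.Nodup) :
    d.items = d.keys.map (fun k => (k, d.getD k dflt)) := by
  simp only [PySem.Dict.keys, List.map_map]
  refine Eq.symm ?_
  refine (List.map_congr_left fun p hp => ?_).trans (List.map_id _)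
  have : d.getD p.1 dflt = p.2 := PySem.Dict.getD_of_mem_items d (by simpa using hp) h dflt
  simp [Function.comp, this]

-- ---------- A's ranges fold ----------

theorem pvInner_fold (flags : String) (l : List Int) (acc : List (Int × Int × String)) (s e : Int) :
    (let st := l.foldl
      (fun (st : List (Int × Int × String) × Int × Int) cp =>
        if cp = st.2.2 + 1 then (st.1, st.2.1, cp)
        else (st.1 ++ [(st.2.1, st.2.2, flags)], cp, cp)) (acc, s, e);
     st.1 ++ [(st.2.1, st.2.2, flags)])
    = acc ++ pvMgo flags s e l := by
  induction l generalizing acc s e with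
  | nil => simp [pvMgo]
  | cons cp t ih =>
    simp only [List.foldl_cons, pvMgo]
    by_cases hc : cp = e + 1
    · simp only [if_pos hc, ih]
    · simp only [if_neg hc, ih, List.append_assoc, List.cons_append, List.nil_append]

-- ---------- order facts ----------

theorem pvXs_pairwise (categories : List (Int × String)) :
    (PySem.List.sorted (PySem.Dict.ofList categories).items (fun p => p.1) false).Pairwise
      (fun a b => a.1 < b.1) := by
  have hle := PySem.List.sorted_pairwise (PySem.Dict.ofList categories).items (fun p => p.1)
  have hnd : (((PySem.List.sorted (PySem.Dict.ofList categories).items (fun p => p.1) false)).map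
      (fun p => p.1)).Nodup := by
    have hperm := PySem.List.sorted_perm (PySem.Dict.ofList categories).items (fun p => p.1) false
    have := PySem.Dict.nodup_keys_ofList categories
    simp only [PySem.Dict.keys] at this
    exact ((hperm.map (fun p => p.1)).nodup_iff).mpr this
  have hne := List.pairwise_map.mp hnd
  exact (hle.and hne).imp (fun h => lt_of_le_of_ne h.1 h.2)

theorem pvGroup_pairwise (legacy : List Int) (xs : List (Int × String)) (k : String × Bool)
    (h : xs.Pairwise (fun a b => a.1 < b.1)) :
    (pvGroup legacy xs k).Pairwise (· < ·) := by
  exact List.pairwise_map.mpr ((h.filter _))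

theorem pvRgo_starts (legacy : List Int) (l : List (Int × String)) (s e : Int) (f : String)
    (hse : s ≤ e) (h : (e :: l.map (fun x => x.1)).Pairwise (· < ·)) :
    (pvRgo legacy s e f l).Pairwise (fun a b => a.1 < b.1) ∧
      ∀ r ∈ pvRgo legacy s e f l, s ≤ r.1 := by
  induction l generalizing s e f with
  | nil =>
    constructor
    · simp [pvRgo]
    · intro r hr; simp only [pvRgo, List.mem_singleton] at hr; simp [hr]
  | cons x t ih =>
    rw [List.map_cons, List.pairwise_cons] at h
    obtain ⟨hlt, hp⟩ := h
    have hex : e < x.1 := hlt _ (by simp)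
    by_cases hc : x.1 = e + 1 ∧ pvF legacy x = f
    · rw [pvRgo, if_pos hc]
      exact ih s x.1 f (le_trans hse (le_of_lt hex)) hp
    · rw [pvRgo, if_neg hc]
      obtain ⟨hp2, hall⟩ := ih x.1 x.1 (pvF legacy x) (le_refl x.1) hp
      constructor
      · rw [List.pairwise_cons]
        refine ⟨fun r hr => lt_of_le_of_lt hse (lt_of_lt_of_le hex (hall r hr)), hp2⟩
      · intro r hr
        rcases List.mem_cons.mp hr with h1 | h2
        · simp [h1]
        · exact le_trans (le_trans hse (le_of_lt hex)) (hall r h2)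

theorem pvRuns_pairwise (legacy : List Int) (xs : List (Int × String))
    (h : xs.Pairwise (fun a b => a.1 < b.1)) :
    (pvRuns legacy xs).Pairwise (fun a b => a.1 < b.1) := by
  cases xs with
  | nil => simp [pvRuns]
  | cons x t =>
    rw [List.pairwise_cons] at h
    exact (pvRgo_starts legacy t x.1 x.1 (pvF legacy x) (le_refl _)
      (by rw [List.pairwise_cons]
          exact ⟨by simpa using fun a b hab => h.1 (a, b) hab, List.pairwise_map.mpr h.2⟩)).1

-- ---------- runs vs per-key merges ----------

theorem pvMgo_head (f : String) (s e : Int) (cps : List Int) (h : ∀ c ∈ cps, e + 1 < c) :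
    pvMgo f s e cps = (s, e, f) :: pvMerge f cps := by
  cases cps with
  | nil => rfl
  | cons c r =>
    rw [pvMgo, if_neg (by have := h c (by simp); omega)]
    rfl

theorem pvRgo_filter (legacy : List Int) (l : List (Int × String)) (s e : Int) (f : String)
    (h : (e :: l.map (fun x => x.1)).Pairwise (· < ·)) :
    ((pvRgo legacy s e f l).filter (fun r => r.2.2 == f)
        = pvMgo f s e ((l.filter (fun x => pvF legacy x == f)).map (fun x => x.1)))
    ∧ (∀ f', f' ≠ f →
        (pvRgo legacy s e f l).filter (fun r => r.2.2 == f')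
          = pvMerge f' ((l.filter (fun x => pvF legacy x == f')).map (fun x => x.1))) := by
  induction l generalizing s e f with
  | nil =>
    constructor
    · simp [pvRgo, pvMgo, List.filter]
    · intro f' hf'
      simp [pvRgo, pvMerge, List.filter,
        (by simp only [beq_eq_false_iff_ne, ne_eq]; exact fun h => hf' h.symm : (f == f') = false)]
  | cons x t ih =>
    rw [List.map_cons, List.pairwise_cons] at h
    obtain ⟨hlt, hp⟩ := h
    have hex : e < x.1 := hlt _ (by simp)
    by_cases hf : pvF legacy x = f
    · by_cases hn : x.1 = e + 1
      · -- x extends the open run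
        have hc : x.1 = e + 1 ∧ pvF legacy x = f := ⟨hn, hf⟩
        rw [pvRgo, if_pos hc]
        obtain ⟨iha, ihb⟩ := ih s x.1 f hp
        constructor
        · rw [List.filter_cons]
          simp only [show (pvF legacy x == f) = true by simp only [hf, beq_self_eq_true], if_true, List.map_cons]
          rw [iha, pvMgo, if_pos hn]
        · intro f' hf'
          rw [ihb f' hf', List.filter_cons]
          simp only [show (pvF legacy x == f') = false by
              simp only [hf, beq_eq_false_iff_ne, ne_eq]; exact fun h => hf' h.symm,
            Bool.false_eq_true, if_false]
      · -- same flags but a numeric gap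
        have hc : ¬(x.1 = e + 1 ∧ pvF legacy x = f) := fun h => hn h.1
        rw [pvRgo, if_neg hc]
        obtain ⟨iha, ihb⟩ := ih x.1 x.1 f hp
        rw [hf]
        constructor
        · rw [List.filter_cons, List.filter_cons]
          simp only [show (((s, e, f) : Int × Int × String).2.2 == f) = true by simp,
            show (pvF legacy x == f) = true by simp only [hf, beq_self_eq_true], if_true,
            List.map_cons]
          rw [iha, pvMgo, if_neg hn]
        · intro f' hf'
          rw [List.filter_cons, List.filter_cons]
          simp only [show (((s, e, f) : Int × Int × String).2.2 == f') = false by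
              simp only [beq_eq_false_iff_ne, ne_eq]; exact fun h => hf' h.symm,
            show (pvF legacy x == f') = false by
              simp only [hf, beq_eq_false_iff_ne, ne_eq]; exact fun h => hf' h.symm,
            Bool.false_eq_true, if_false]
          exact ihb f' hf'
    · -- flags change: close the run
      have hc : ¬(x.1 = e + 1 ∧ pvF legacy x = f) := fun h => hf h.2
      rw [pvRgo, if_neg hc]
      obtain ⟨iha, ihb⟩ := ih x.1 x.1 (pvF legacy x) hp
      constructor
      · rw [List.filter_cons, List.filter_cons]
        simp only [show (((s, e, f) : Int × Int × String).2.2 == f) = true by simp,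
          show (pvF legacy x == f) = false by simp only [beq_eq_false_iff_ne, ne_eq]; exact hf, if_true,
          Bool.false_eq_true, if_false]
        rw [ihb f (fun h => hf h.symm), pvMgo_head]
        intro c hc
        simp only [List.mem_map, List.mem_filter] at hc
        obtain ⟨y, ⟨hy, _⟩, rfl⟩ := hc
        have h1 : x.1 < y.1 := by
          rcases List.pairwise_cons.mp hp with ⟨h2, _⟩
          exact h2 _ (List.mem_map_of_mem hy)
        omega
      · intro f' hf'
        by_cases hfx : f' = pvF legacy x
        · subst hfx
          rw [List.filter_cons, List.filter_cons]
          simp only [show (((s, e, f) : Int × Int × String).2.2 == pvF legacy x) = false by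
              simp only [beq_eq_false_iff_ne, ne_eq]; exact fun h => hf h.symm,
            beq_self_eq_true, if_true, Bool.false_eq_true, if_false, List.map_cons]
          rw [iha]
          rfl
        · rw [List.filter_cons, List.filter_cons]
          simp only [show (((s, e, f) : Int × Int × String).2.2 == f') = false by
              simp only [beq_eq_false_iff_ne, ne_eq]; exact fun h => hf' h.symm,
            show (pvF legacy x == f') = false by
              simp only [beq_eq_false_iff_ne, ne_eq]; exact fun h => hfx h.symm,
            Bool.false_eq_true, if_false]
          exact ihb f' hfx

theorem pvRuns_filter (legacy : List Int) (xs : List (Int × String)) (k : String × Bool)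
    (h : xs.Pairwise (fun a b => a.1 < b.1)) :
    (pvRuns legacy xs).filter (fun r => r.2.2 == pvRender k)
      = pvMerge (pvRender k) ((xs.filter (fun x => pvF legacy x == pvRender k)).map (fun x => x.1)) := by
  cases xs with
  | nil => simp [pvRuns, pvMerge]
  | cons x t =>
    rw [List.pairwise_cons] at h
    have hpt : (x.1 :: t.map (fun x => x.1)).Pairwise (· < ·) := by
      rw [List.pairwise_cons]
      exact ⟨by simpa using fun a b hab => h.1 (a, b) hab, List.pairwise_map.mpr h.2⟩
    by_cases hk : pvRender k = pvF legacy x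
    · rw [pvRuns, hk, (pvRgo_filter legacy t x.1 x.1 (pvF legacy x) hpt).1, List.filter_cons]
      simp only [show (pvF legacy x == pvF legacy x) = true by simp, if_true, List.map_cons]
      rfl
    · rw [pvRuns, (pvRgo_filter legacy t x.1 x.1 (pvF legacy x) hpt).2 (pvRender k) hk,
        List.filter_cons]
      simp only [show (pvF legacy x == pvRender k) = false by
          simp only [beq_eq_false_iff_ne, ne_eq]; exact fun hh => hk hh.symm,
        Bool.false_eq_true, if_false]

theorem pvRgo_flags (legacy : List Int) (l : List (Int × String)) (s e : Int) (f : String) :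
    ∀ r ∈ pvRgo legacy s e f l, r.2.2 = f ∨ ∃ x ∈ l, r.2.2 = pvF legacy x := by
  induction l generalizing s e f with
  | nil => intro r hr; simp only [pvRgo, List.mem_singleton] at hr; simp [hr]
  | cons x t ih =>
    intro r hr
    rw [pvRgo] at hr
    split_ifs at hr with hc
    · rcases ih s x.1 f r hr with h1 | ⟨y, hy, h2⟩
      · exact Or.inl h1
      · exact Or.inr ⟨y, by simp [hy], h2⟩
    · rcases List.mem_cons.mp hr with h1 | h2
      · exact Or.inl (by simp [h1])
      · rcases ih x.1 x.1 (pvF legacy x) r h2 with h1 | ⟨y, hy, h3⟩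
        · exact Or.inr ⟨x, by simp, h1⟩
        · exact Or.inr ⟨y, by simp [hy], h3⟩

-- render is injective on keys whose major is a single character (all keys A builds).
theorem pvRender_inj (k k' : String × Bool) (c c' : Char)
    (h : k.1 = String.ofList [c]) (h' : k'.1 = String.ofList [c'])
    (he : pvRender k = pvRender k') : k = k' := by
  obtain ⟨a, b⟩ := k
  obtain ⟨a', b'⟩ := k'
  simp only [pvRender] at he
  simp only at h h'
  subst h h'
  cases b <;> cases b' <;> simp only [if_true, if_false, Bool.false_eq_true] at he
  · simpa using he
  · exfalso
    have := congrArg String.toList he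
    simp [String.toList_append] at this
  · exfalso
    have := congrArg String.toList he
    simp [String.toList_append] at this
  · have := congrArg String.toList he
    simp [String.toList_append] at this
    simp [this]

theorem pvMajor_single (cat : String) : ∃ c, pvMajor cat = String.ofList [c] := by
  unfold pvMajor
  cases cat.toList with
  | nil => exact ⟨'C', rfl⟩
  | cons c r => exact ⟨c, rfl⟩

-- partition: flatMapping the class filters of a list over its (distinct) classes is a permutation
theorem pvPartition_perm (ks : List (String × Bool)) (rs : List (Int × Int × String))
    (hk : ks.Pairwise (fun a b => pvRender a ≠ pvRender b))
    (hc : ∀ r ∈ rs, ∃ k ∈ ks, r.2.2 = pvRender k) :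
    (ks.flatMap (fun k => rs.filter (fun r => r.2.2 == pvRender k))).Perm rs := by
  induction ks generalizing rs with
  | nil =>
    cases rs with
    | nil => simp
    | cons r t => exact absurd (hc r (by simp)) (by simp)
  | cons k ks ih =>
    rw [List.flatMap_cons]
    rw [List.pairwise_cons] at hk
    have hcongr : ∀ k' ∈ ks, rs.filter (fun r => r.2.2 == pvRender k')
        = (rs.filter (fun r => !(r.2.2 == pvRender k))).filter (fun r => r.2.2 == pvRender k') := by
      intro k' hk'
      rw [List.filter_filter]
      refine (List.filter_congr fun r _ => ?_).symm
      by_cases hr : r.2.2 = pvRender k'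
      · simp only [hr, beq_self_eq_true, Bool.true_and, beq_eq_false_iff_ne, ne_eq,
          Bool.not_eq_true']
        exact fun hh => hk.1 k' hk' hh.symm
      · simp [beq_eq_false_iff_ne, hr]
    rw [List.flatMap_congr hcongr]
    refine List.Perm.trans (List.Perm.append_left _ (ih (rs.filter (fun r => !(r.2.2 == pvRender k))) hk.2
      (fun r hr => ?_))) (List.filter_append_perm _ rs)
    have hrs : r ∈ rs ∧ ¬r.2.2 = pvRender k := by simpa using List.mem_filter.mp hr
    obtain ⟨k', hk', hkr⟩ := hc r hrs.1
    rcases List.mem_cons.mp hk' with h1 | h2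
    · exact absurd (h1 ▸ hkr) hrs.2
    · exact ⟨k', h2, hkr⟩

-- ---------- putting A together ----------

theorem pvBody_eq (acc : List (Int × Int × String)) (kv : (String × Bool) × List Int) :
    (let cps := PySem.List.sorted (PySem.Set.ofList kv.2) (fun x => x) false
     match cps with
     | [] => acc
     | c0 :: rest =>
       let flags := if kv.1.2 then kv.1.1 ++ "|MN" else kv.1.1
       let st := rest.foldl
         (fun (st : List (Int × Int × String) × Int × Int) cp =>
           if cp = st.2.2 + 1 then (st.1, st.2.1, cp)
           else (st.1 ++ [(st.2.1, st.2.2, flags)], cp, cp))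
         (acc, c0, c0)
       st.1 ++ [(st.2.1, st.2.2, flags)])
    = acc ++ pvMerge (pvRender kv.1)
        (PySem.List.sorted (PySem.Set.ofList kv.2) (fun x => x) false) := by
  cases h : PySem.List.sorted (PySem.Set.ofList kv.2) (fun x => x) false with
  | nil => simp [pvMerge]
  | cons c0 rest =>
    show (let st := rest.foldl _ (acc, c0, c0); st.1 ++ [(st.2.1, st.2.2, _)]) = _
    rw [pvInner_fold (if kv.1.2 then kv.1.1 ++ "|MN" else kv.1.1) rest acc c0 c0]
    rfl

theorem pvA_eq_sorted_flatMap (categories : List (Int × String)) (legacy : List Int) :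
    build_category_ranges categories legacy =
      (PySem.List.sorted
        ((PySem.Set.ofList
            ((PySem.List.sorted (PySem.Dict.ofList categories).items (fun p => p.1) false).map
              (pvKey legacy))).flatMap
          (fun k => pvMerge (pvRender k)
            (pvGroup legacy
              (PySem.List.sorted (PySem.Dict.ofList categories).items (fun p => p.1) false) k)))
        (fun r => r.1) false).filter (fun r => decide (128 ≤ r.1)) := by
  simp only [build_category_ranges]
  refine congrArg (fun l : List (Int × Int × String) =>
    (PySem.List.sorted l (fun r => r.1) false).filter (fun r => decide (128 ≤ r.1))) ?_
  have hxs := pvXs_pairwise categories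
  set xs := PySem.List.sorted (PySem.Dict.ofList categories).items (fun p => p.1) false with hxsdef
  have hdict : xs.foldl
      (fun d p =>
        let key := (pvMajor p.2, (PySem.Set.ofList legacy).contains p.1)
        let d := if d.contains key then d else d.insert key []
        d.insert key (d.getD key [] ++ [p.1])) PySem.Dict.empty
      = xs.foldl (pvStepD legacy) PySem.Dict.empty := rfl
  rw [hdict]
  set d := xs.foldl (pvStepD legacy) PySem.Dict.empty with hddef
  have hnd : d.keys.Nodup := by
    rw [hddef, pvDict_keys]
    exact PySem.Set.nodup_ofList _
  rw [PySem.List.foldl_congr_mem _ _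
    (fun acc kv => acc ++ pvMerge (pvRender kv.1)
      (PySem.List.sorted (PySem.Set.ofList kv.2) (fun x => x) false)) _
    (fun acc kv _ => pvBody_eq acc kv)]
  rw [PySem.List.foldl_append_eq_flatMap, List.nil_append]
  rw [pvItems_eq_keys_map d [] hnd, List.flatMap_map]
  rw [hddef, pvDict_keys]
  refine List.flatMap_congr fun k hk => ?_
  have hgrp : PySem.List.sorted (PySem.Set.ofList (d.getD k [])) (fun x => x) false
      = pvGroup legacy xs k := by
    rw [hddef, pvDict_getD]
    have hpw := pvGroup_pairwise legacy xs k hxs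
    rw [PySem.Set.ofList_eq_self_of_nodup _ ((List.Pairwise.imp ne_of_lt hpw : List.Pairwise (· ≠ ·) _)) ]
    exact PySem.List.sorted_eq_self_of_pairwise _ _ (hpw.imp le_of_lt)
  show pvMerge (pvRender k) _ = _
  rw [← hddef, hgrp]

theorem pvRuns_flags (legacy : List Int) (xs : List (Int × String)) :
    ∀ r ∈ pvRuns legacy xs, ∃ x ∈ xs, r.2.2 = pvF legacy x := by
  cases xs with
  | nil => simp [pvRuns]
  | cons x t =>
    intro r hr
    rcases pvRgo_flags legacy t x.1 x.1 (pvF legacy x) r hr with h1 | ⟨y, hy, h2⟩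
    · exact ⟨x, by simp, h1⟩
    · exact ⟨y, by simp [hy], h2⟩

theorem pvKey_single (legacy : List Int) (p : Int × String) :
    ∃ c, (pvKey legacy p).1 = String.ofList [c] := pvMajor_single p.2

-- ===== VERDICT (by name: the statement is the Claim_ definition above) =====
theorem build_category_ranges_spec : Claim_equal_build_category_ranges := by
  intro categories legacy _
  show build_category_ranges categories legacy = build_category_ranges_alt categories legacy
  rw [pvA_eq_sorted_flatMap]
  have hxs := pvXs_pairwise categories
  set xs := PySem.List.sorted (PySem.Dict.ofList categories).items (fun p => p.1) false with hxsdef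
  have halt : build_category_ranges_alt categories legacy
      = (pvRuns legacy xs).filter (fun r => decide (128 ≤ r.1)) := by
    simp only [build_category_ranges_alt]
    rw [pvAlt_eq_runs]
  rw [halt]
  refine congrArg (fun l : List (Int × Int × String) =>
    l.filter (fun r => decide (128 ≤ r.1))) ?_
  set ks := PySem.Set.ofList (xs.map (pvKey legacy)) with hksdef
  have hsingle : ∀ k ∈ ks, ∃ c, k.1 = String.ofList [c] := by
    intro k hk
    rw [hksdef] at hk
    obtain ⟨y, _, rfl⟩ := List.mem_map.mp ((PySem.Set.mem_ofList _ _).mp hk)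
    exact pvKey_single legacy y
  have hflat : ks.flatMap (fun k => pvMerge (pvRender k) (pvGroup legacy xs k))
      = ks.flatMap (fun k => (pvRuns legacy xs).filter (fun r => r.2.2 == pvRender k)) := by
    refine List.flatMap_congr fun k hk => ?_
    rw [pvRuns_filter legacy xs k hxs]
    unfold pvGroup
    congr 1
    congr 1
    refine List.filter_congr fun x _ => ?_
    by_cases hxk : pvKey legacy x = k
    · simp [hxk, pvF]
    · have : ¬pvF legacy x = pvRender k := by
        intro hf
        obtain ⟨c, hc⟩ := pvKey_single legacy x
        obtain ⟨c', hc'⟩ := hsingle k hk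
        exact hxk (pvRender_inj _ _ c c' hc hc' hf)
      simp [hxk, pvF]
      exact fun hh => this (by simpa [pvF] using hh)
  rw [hflat]
  refine PySem.List.sorted_eq_of_perm_of_pairwise_lt _ _ _ ?_ (pvRuns_pairwise legacy xs hxs)
  refine (pvPartition_perm ks (pvRuns legacy xs) ?_ ?_).symm
  · refine List.Pairwise.imp_of_mem ?_ (PySem.Set.nodup_ofList _)
    intro a b ha hb hab hr
    obtain ⟨c, hc⟩ := hsingle a ha
    obtain ⟨c', hc'⟩ := hsingle b hb
    exact hab (pvRender_inj _ _ c c' hc hc' hr)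
  · intro r hr
    obtain ⟨x, hx, hfx⟩ := pvRuns_flags legacy xs r hr
    exact ⟨pvKey legacy x,
      (PySem.Set.mem_ofList _ _).mpr (List.mem_map_of_mem hx), hfx⟩
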